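-- pv_equiv track=rewrite | github.com/LucasNakamuraB/UEM | FA/Listas_ED/Lista_Repet.py | count_min_2rep
-- ===== SOURCE A (Python) =====
-- def count_min_2rep(lst):
--     '''
--     conta quantas vezes o valor minimo de uma função aparece
--
--     >>> count_min_2rep([2,1,1,2,0,0,0])
--     3
--     '''
--     n = 0
--     min = lst[0]
--     for i in lst:
--         if i < min:
--             min = i
--
--     for i in lst:
--         if i == min:
--             n += 1
--
--     return n
-- ===== SOURCE B (Python) =====
-- def count_min_2rep(lst):
--     m = lst[0]
--     n = 1
--     for x in lst[1:]:
--         if x < m: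
--             m = x
--             n = 1
--         elif x == m:
--             n += 1
--     return n
-- ===== Notes on version B (the rewrite author's own statement) =====
-- stated objective: alternative
-- what changed: Replaces A's two separate passes (one to find the minimum, one to count it) with a single combined traversal that maintains the running minimum and its occurrence count together.
import Mathlib
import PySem

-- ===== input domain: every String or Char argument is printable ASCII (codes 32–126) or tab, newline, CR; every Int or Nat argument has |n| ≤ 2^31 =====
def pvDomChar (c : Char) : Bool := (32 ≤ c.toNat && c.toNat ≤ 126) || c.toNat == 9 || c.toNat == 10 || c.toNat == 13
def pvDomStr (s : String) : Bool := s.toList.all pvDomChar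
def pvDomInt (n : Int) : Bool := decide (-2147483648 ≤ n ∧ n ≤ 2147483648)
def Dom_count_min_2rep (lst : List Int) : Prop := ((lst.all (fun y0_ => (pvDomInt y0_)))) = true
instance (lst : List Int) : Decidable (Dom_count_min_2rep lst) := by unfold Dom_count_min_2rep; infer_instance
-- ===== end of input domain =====

-- B replaces A's two separate passes (find the minimum, then count it) by one
-- combined traversal maintaining the running minimum together with its count.

-- ===== PORT A =====
def count_min_2rep (lst : List Int) : Int :=
  -- min = first element  (IndexError on the empty list is excluded by Pre_count_min_2rep)
  let mn := lst.foldl (fun m i => if i < m then i else m) ((PySem.List.pyGet? lst 0).getD 0)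
  lst.foldl (fun n i => if i = mn then n + 1 else n) 0

-- ===== PORT B =====
def count_min_2rep_alt (lst : List Int) : Int :=
  -- m = first element  (IndexError on the empty list is excluded by Pre_count_min_2rep)
  let m0 := (PySem.List.pyGet? lst 0).getD 0
  ((PySem.List.slice lst (some 1) none).foldl
      (fun (p : Int × Int) x =>
        if x < p.1 then (x, 1) else if x = p.1 then (p.1, p.2 + 1) else p)
      (m0, 1)).2

-- ===== PRECONDITION & SPEC =====
-- A indexes the first element, which raises IndexError on the empty list; Pre_ excludes exactly that.
def Pre_count_min_2rep (lst : List Int) : Prop := lst ≠ []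
instance (lst : List Int) : Decidable (Pre_count_min_2rep lst) := by unfold Pre_count_min_2rep; infer_instance
def pvWitness_count_min_2rep : List Int := ([2, 1, 1, 2, 0, 0, 0])

def Spec_count_min_2rep (lst : List Int) (out : Int) : Prop := out = count_min_2rep_alt lst
instance (lst : List Int) (out : Int) : Decidable (Spec_count_min_2rep lst out) := by unfold Spec_count_min_2rep; infer_instance

-- ===== CLAIM (what is proved, stated in full; the proofs are below) =====
def Claim_equal_count_min_2rep : Prop := ∀ (lst : List Int), Dom_count_min_2rep lst → Pre_count_min_2rep lst → Spec_count_min_2rep lst (count_min_2rep lst)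

-- ===== LEMMAS AND PROOFS =====

-- number of occurrences of v in a list
def pvCnt (v : Int) : List Int → Int
  | [] => 0
  | x :: xs => (if x = v then 1 else 0) + pvCnt v xs

theorem pvFmin_le (xs : List Int) (m : Int) :
    xs.foldl (fun m i => if i < m then i else m) m ≤ m := by
  induction xs generalizing m with
  | nil => simp
  | cons x xs ih =>
      simp only [List.foldl_cons]
      refine le_trans (ih _) ?_
      split <;> omega

theorem pvCntFold (xs : List Int) (v n : Int) :
    xs.foldl (fun n i => if i = v then n + 1 else n) n = n + pvCnt v xs := by
  induction xs generalizing n with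
  | nil => simp [pvCnt]
  | cons x xs ih =>
      simp only [List.foldl_cons, pvCnt, ih]
      split <;> omega

theorem pvLoopB (xs : List Int) (m k : Int) :
    xs.foldl (fun (p : Int × Int) x =>
        if x < p.1 then (x, 1) else if x = p.1 then (p.1, p.2 + 1) else p) (m, k)
      = (xs.foldl (fun m i => if i < m then i else m) m,
         if xs.foldl (fun m i => if i < m then i else m) m = m
         then k + pvCnt m xs
         else pvCnt (xs.foldl (fun m i => if i < m then i else m) m) xs) := by
  induction xs generalizing m k with
  | nil => simp [pvCnt]
  | cons x xs ih =>
      simp only [List.foldl_cons]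
      by_cases hlt : x < m
      · have hle := pvFmin_le xs x
        simp only [if_pos hlt, ih, pvCnt]
        have hne : xs.foldl (fun m i => if i < m then i else m) x ≠ m := by omega
        simp only [if_neg hne]
        by_cases hx : xs.foldl (fun m i => if i < m then i else m) x = x
        · simp [hx]
        · have : ¬ x = xs.foldl (fun m i => if i < m then i else m) x := fun h => hx h.symm
          simp [hx, this]
      · simp only [if_neg hlt]
        by_cases heq : x = m
        · subst heq
          simp only [ih, pvCnt]
          by_cases hm : xs.foldl (fun m i => if i < m then i else m) x = x
          · simp [hm]; ring
          · have : ¬ x = xs.foldl (fun m i => if i < m then i else m) x := fun h => hm h.symm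
            simp [hm, this]
        · have hle := pvFmin_le xs m
          simp only [if_neg heq, ih, pvCnt]
          by_cases hm : xs.foldl (fun m i => if i < m then i else m) m = m
          · simp [hm]
          · have : ¬ x = xs.foldl (fun m i => if i < m then i else m) m := by
              intro h; apply heq; omega
            simp [hm, this]

-- ===== VERDICT (by name: the statement is the Claim_ definition above) =====
theorem count_min_2rep_spec : Claim_equal_count_min_2rep := by
  intro lst _ hpre
  unfold Spec_count_min_2rep count_min_2rep count_min_2rep_alt
  match lst, hpre with
  | x :: xs, _ =>
    simp only [PySem.List.slice_from_one, List.tail_cons]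
    have h0 : (PySem.List.pyGet? (x :: xs) 0).getD 0 = x := by
      simp [PySem.List.pyGet?, PySem.List.pyIdx?]
    rw [h0]
    simp only [List.foldl_cons, if_neg (lt_irrefl x)]
    rw [pvLoopB, pvCntFold]; simp only [pvCnt]
    have hle := pvFmin_le xs x
    by_cases hm : xs.foldl (fun m i => if i < m then i else m) x = x
    · simp [hm]
    · have : ¬ x = xs.foldl (fun m i => if i < m then i else m) x := fun h => hm h.symm
      simp [hm, this]
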